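-- pv_equiv track=rewrite | github.com/satyam8254/Python-program | python-code/countGoodSubstrings.py | countGoodSubstring
-- ===== SOURCE A (Python) =====
-- def countGoodSubstring(n,string):
--     curr=1
--     prev=0
--     res=0
--     for i in range(1,n):
--         if string[i]==string[i-1]:
--             curr+=1
--         else:
--             res+=min(curr,prev)
--             prev=curr
--             curr=1
--     return res+min(curr,prev)
-- ===== SOURCE B (Python) =====
-- def countGoodSubstring(n, string):
--     # For each mismatch boundary i, expand left and right from the boundary
--     # to measure the two adjacent equal-char runs and add min of their lengths.
--     res = 0
--     for i in range(1, n):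
--         if string[i] != string[i - 1]:
--             l = 1
--             while 0 <= i - 1 - l and string[i - 1 - l] == string[i - 1]:
--                 l += 1
--             r = 1
--             while i + r < n and string[i + r] == string[i]:
--                 r += 1
--             res += min(l, r)
--     return res
-- ===== Notes on version B (the rewrite author's own statement) =====
-- stated objective: alternative
-- what changed: A streams one pass carrying prev/curr run lengths and folding mins into an accumulator; B instead, at every mismatch boundary i, expands outward (left and right scans from the boundary) to measure the two adjacent runs directly and adds min(l, r) per boundary.
import Mathlib
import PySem

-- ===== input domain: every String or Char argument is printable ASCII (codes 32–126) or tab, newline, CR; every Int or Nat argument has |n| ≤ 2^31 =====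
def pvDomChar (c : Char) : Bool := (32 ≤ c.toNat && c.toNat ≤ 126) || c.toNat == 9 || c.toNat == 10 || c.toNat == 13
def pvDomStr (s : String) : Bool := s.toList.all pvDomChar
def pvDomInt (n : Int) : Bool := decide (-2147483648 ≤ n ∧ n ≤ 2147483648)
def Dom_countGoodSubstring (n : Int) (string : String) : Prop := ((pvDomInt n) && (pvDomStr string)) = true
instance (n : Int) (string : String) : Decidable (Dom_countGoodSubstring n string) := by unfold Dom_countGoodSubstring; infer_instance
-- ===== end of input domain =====

-- B replaces A's streaming prev/curr pass by a per-boundary outward expansion: at each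
-- mismatch boundary it scans left and right to measure the two adjacent runs and adds
-- min of the lengths (objective: alternative algorithm, same result).

-- ===== PORT A =====
-- single pass with state (curr, prev, res); char lookup via pyGet? (exact under Pre_)
def countGoodSubstring (n : Int) (string : String) : Int :=
  let cs := string.toList
  let st := (PySem.List.pyRange 1 n 1).foldl
    (fun (s : Int × Int × Int) i =>
      if PySem.List.pyGet? cs i = PySem.List.pyGet? cs (i - 1) then
        (s.1 + 1, s.2.1, s.2.2)
      else
        (1, s.1, s.2.2 + min s.1 s.2.1))
    (1, 0, 0)
  st.2.2 + min st.1 st.2.1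

-- ===== PORT B =====
-- `while 0 <= i-1-l and string[i-1-l] == string[i-1]: l += 1`
def pvWhileL (cs : List Char) (i l : Int) : Int :=
  if 0 ≤ i - 1 - l ∧ PySem.List.pyGet? cs (i - 1 - l) = PySem.List.pyGet? cs (i - 1) then
    pvWhileL cs i (l + 1)
  else l
termination_by (i - l).toNat
decreasing_by omega

-- `while i + r < n and string[i+r] == string[i]: r += 1`
def pvWhileR (n : Int) (cs : List Char) (i r : Int) : Int :=
  if i + r < n ∧ PySem.List.pyGet? cs (i + r) = PySem.List.pyGet? cs i then
    pvWhileR n cs i (r + 1)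
  else r
termination_by (n - (i + r)).toNat
decreasing_by omega

def countGoodSubstring_alt (n : Int) (string : String) : Int :=
  let cs := string.toList
  (PySem.List.pyRange 1 n 1).foldl
    (fun (res : Int) i =>
      if PySem.List.pyGet? cs i ≠ PySem.List.pyGet? cs (i - 1) then
        res + min (pvWhileL cs i 1) (pvWhileR n cs i 1)
      else res)
    0

-- ===== PRECONDITION & SPEC =====
-- Pre_ excludes exactly the inputs where the Pythons raise IndexError: n ≥ 2 with n > len(string).
def Pre_countGoodSubstring (n : Int) (string : String) : Prop :=
  n ≤ 1 ∨ n ≤ (string.length : Int)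
instance (n : Int) (string : String) : Decidable (Pre_countGoodSubstring n string) := by
  unfold Pre_countGoodSubstring; infer_instance
def pvWitness_countGoodSubstring : Int × String := (3, "aab")

def Spec_countGoodSubstring (n : Int) (string : String) (out : Int) : Prop := out = countGoodSubstring_alt n string
instance (n : Int) (string : String) (out : Int) : Decidable (Spec_countGoodSubstring n string out) := by unfold Spec_countGoodSubstring; infer_instance

-- ===== CLAIM (what is proved, stated in full; the proofs are below) =====
def Claim_equal_countGoodSubstring : Prop := ∀ (n : Int) (string : String), Dom_countGoodSubstring n string → Pre_countGoodSubstring n string → Spec_countGoodSubstring n string (countGoodSubstring n string)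

-- ===== LEMMAS AND PROOFS =====

-- number of consecutive positions j, j-1, … holding character value c (going left)
def pvG (cs : List Char) (c : Option Char) (j : Int) : Int :=
  if 0 ≤ j ∧ PySem.List.pyGet? cs j = c then 1 + pvG cs c (j - 1) else 0
termination_by (j + 1).toNat
decreasing_by omega

-- number of consecutive positions j, j+1, … below n holding character value c (going right)
def pvH (n : Int) (cs : List Char) (c : Option Char) (j : Int) : Int :=
  if j < n ∧ PySem.List.pyGet? cs j = c then 1 + pvH n cs c (j + 1) else 0
termination_by (n - j).toNat
decreasing_by omega

theorem pvWhileL_eq (cs : List Char) (i l : Int) :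
    pvWhileL cs i l = l + pvG cs (PySem.List.pyGet? cs (i - 1)) (i - 1 - l) := by
  fun_induction pvWhileL cs i l with
  | case1 l h ih =>
      conv_rhs => rw [pvG, if_pos h]
      rw [ih]
      have e : i - 1 - (l + 1) = i - 1 - l - 1 := by ring
      rw [e]; ring
  | case2 l h =>
      rw [pvG, if_neg h]; ring

theorem pvWhileR_eq (n : Int) (cs : List Char) (i r : Int) :
    pvWhileR n cs i r = r + pvH n cs (PySem.List.pyGet? cs i) (i + r) := by
  fun_induction pvWhileR n cs i r with
  | case1 r h ih =>
      conv_rhs => rw [pvH, if_pos h]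
      rw [ih]
      have e : i + (r + 1) = i + r + 1 := by ring
      rw [e]; ring
  | case2 r h =>
      rw [pvH, if_neg h]; ring

theorem pvH_nonneg (n : Int) (cs : List Char) (c : Option Char) (j : Int) :
    0 ≤ pvH n cs c j := by
  fun_induction pvH n cs c j with
  | case1 j h ih => omega
  | case2 j h => simp

-- named pieces of the two ports (definitionally equal to them), to state the invariant
def pvFoldA (n : Int) (cs : List Char) (i : Int) (s : Int × Int × Int) : Int × Int × Int :=
  (PySem.List.pyRange i n 1).foldl
    (fun (s : Int × Int × Int) i =>
      if PySem.List.pyGet? cs i = PySem.List.pyGet? cs (i - 1) then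
        (s.1 + 1, s.2.1, s.2.2)
      else
        (1, s.1, s.2.2 + min s.1 s.2.1))
    s

def pvOutA (n : Int) (cs : List Char) (i : Int) (s : Int × Int × Int) : Int :=
  (pvFoldA n cs i s).2.2 + min (pvFoldA n cs i s).1 (pvFoldA n cs i s).2.1

def pvFoldB (n : Int) (cs : List Char) (i : Int) (a : Int) : Int :=
  (PySem.List.pyRange i n 1).foldl
    (fun (res : Int) i =>
      if PySem.List.pyGet? cs i ≠ PySem.List.pyGet? cs (i - 1) then
        res + min (pvWhileL cs i 1) (pvWhileR n cs i 1)
      else res)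
    a

theorem pvFoldA_nil (n : Int) (cs : List Char) (i : Int) (s : Int × Int × Int)
    (h : n ≤ i) : pvFoldA n cs i s = s := by
  unfold pvFoldA
  rw [PySem.List.pyRange_one_eq_nil h, List.foldl_nil]

theorem pvOutA_cons (n : Int) (cs : List Char) (i curr prev res : Int)
    (h : i < n) :
    pvOutA n cs i (curr, prev, res) = pvOutA n cs (i + 1)
      (if PySem.List.pyGet? cs i = PySem.List.pyGet? cs (i - 1) then
        (curr + 1, prev, res)
      else
        (1, curr, res + min curr prev)) := by
  unfold pvOutA pvFoldA
  rw [PySem.List.pyRange_one_cons h]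
  rfl

theorem pvFoldB_nil (n : Int) (cs : List Char) (i a : Int) (h : n ≤ i) :
    pvFoldB n cs i a = a := by
  unfold pvFoldB
  rw [PySem.List.pyRange_one_eq_nil h, List.foldl_nil]

theorem pvFoldB_cons (n : Int) (cs : List Char) (i a : Int) (h : i < n) :
    pvFoldB n cs i a = pvFoldB n cs (i + 1)
      (if PySem.List.pyGet? cs i ≠ PySem.List.pyGet? cs (i - 1) then
        a + min (pvWhileL cs i 1) (pvWhileR n cs i 1)
      else a) := by
  unfold pvFoldB
  rw [PySem.List.pyRange_one_cons h, List.foldl_cons]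

-- B's fold only adds to the accumulator
theorem pvFoldB_add (n : Int) (cs : List Char) (i a : Int) :
    pvFoldB n cs i a = a + pvFoldB n cs i 0 := by
  unfold pvFoldB
  generalize PySem.List.pyRange i n 1 = l
  induction l generalizing a with
  | nil => simp
  | cons x xs ih =>
      simp only [List.foldl_cons]
      by_cases h : PySem.List.pyGet? cs x ≠ PySem.List.pyGet? cs (x - 1)
      · rw [if_pos h, if_pos h, ih (a + _), ih (0 + _)]; ring
      · rw [if_neg h, if_neg h]; exact ih a

-- master invariant: A's remaining computation from position i equals its pending
-- min-term (full length of the run containing position i-1, against prev) plus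
-- B's per-boundary sum over the rest of the range
theorem pvMaster (n : Int) (cs : List Char) :
    ∀ (k : Nat) (i curr prev res : Int), (n - i).toNat = k → 1 ≤ i →
    curr = 1 + pvG cs (PySem.List.pyGet? cs (i - 1)) (i - 2) →
    pvOutA n cs i (curr, prev, res)
    = res + min (curr - 1 + (1 + pvH n cs (PySem.List.pyGet? cs (i - 1)) i)) prev
        + pvFoldB n cs i 0 := by
  intro k
  induction k with
  | zero =>
      intro i curr prev res hk hi hcurr
      rw [pvFoldB_nil n cs i 0 (by omega)]
      unfold pvOutA
      rw [pvFoldA_nil n cs i _ (by omega)]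
      rw [pvH, if_neg (fun hc => absurd hc.1 (by omega))]
      show res + min curr prev = res + min (curr - 1 + (1 + 0)) prev + 0
      omega
  | succ k ih =>
      intro i curr prev res hk hi hcurr
      have hin : i < n := by omega
      rw [pvOutA_cons n cs i curr prev res hin, pvFoldB_cons n cs i 0 hin]
      by_cases heq : PySem.List.pyGet? cs i = PySem.List.pyGet? cs (i - 1)
      · -- same character: the run continues, no boundary here
        rw [if_pos heq, if_neg (by simp [heq])]
        have e1 : i + 1 - 1 = i := by ring
        have e2 : i + 1 - 2 = i - 1 := by ring
        have hcurr' : curr + 1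
            = 1 + pvG cs (PySem.List.pyGet? cs (i + 1 - 1)) (i + 1 - 2) := by
          rw [e1, e2]
          conv_rhs => rw [pvG, if_pos ⟨by omega, heq.symm⟩]
          rw [heq]
          have e3 : i - 1 - 1 = i - 2 := by ring
          rw [e3]
          omega
        rw [ih (i + 1) (curr + 1) prev res (by omega) (by omega) hcurr']
        rw [e1]
        have hH : pvH n cs (PySem.List.pyGet? cs (i - 1)) i
            = 1 + pvH n cs (PySem.List.pyGet? cs i) (i + 1) := by
          rw [pvH, if_pos ⟨hin, heq⟩, heq]
        rw [hH]
        ring_nf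
      · -- boundary: A flushes min(curr, prev); B measures both runs from the boundary
        rw [if_neg heq, if_pos heq]
        have e1 : i + 1 - 1 = i := by ring
        have e2 : i + 1 - 2 = i - 1 := by ring
        have hcurr' : (1 : Int) = 1 + pvG cs (PySem.List.pyGet? cs (i + 1 - 1)) (i + 1 - 2) := by
          rw [e1, e2]
          conv_rhs => rw [pvG, if_neg (fun hc => heq hc.2.symm)]
          omega
        rw [ih (i + 1) 1 curr (res + min curr prev) (by omega) (by omega) hcurr']
        rw [e1, pvFoldB_add n cs (i + 1) (0 + min (pvWhileL cs i 1) (pvWhileR n cs i 1))]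
        have hH0 : pvH n cs (PySem.List.pyGet? cs (i - 1)) i = 0 := by
          rw [pvH, if_neg (fun hc => heq hc.2)]
        have hL : pvWhileL cs i 1 = curr := by
          rw [pvWhileL_eq]
          have e3 : i - 1 - 1 = i - 2 := by ring
          rw [e3]
          omega
        have hR : pvWhileR n cs i 1 = 1 + pvH n cs (PySem.List.pyGet? cs i) (i + 1) := by
          rw [pvWhileR_eq]
        rw [hH0, hL, hR]
        have hmc := min_comm curr (1 + pvH n cs (PySem.List.pyGet? cs i) (i + 1))
        omega

theorem pvFinal (n : Int) (string : String) :
    countGoodSubstring n string = countGoodSubstring_alt n string := by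
  have hA : countGoodSubstring n string = pvOutA n string.toList 1 (1, 0, 0) := rfl
  have hB : countGoodSubstring_alt n string = pvFoldB n string.toList 1 0 := rfl
  rw [hA, hB]
  by_cases h1 : n ≤ 1
  · rw [pvFoldB_nil n string.toList 1 0 h1]
    unfold pvOutA
    rw [pvFoldA_nil n string.toList 1 _ h1]
    simp
  · have h0 : (1 : Int) = 1 + pvG string.toList (PySem.List.pyGet? string.toList (1 - 1)) (1 - 2) := by
      rw [pvG, if_neg (fun hc => absurd hc.1 (by omega))]
      omega
    rw [pvMaster n string.toList (n - 1).toNat 1 1 0 0 (by omega) le_rfl h0]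
    have hn := pvH_nonneg n string.toList (PySem.List.pyGet? string.toList (1 - 1)) 1
    omega

-- ===== VERDICT (by name: the statement is the Claim_ definition above) =====
theorem countGoodSubstring_spec : Claim_equal_countGoodSubstring := by
  intro n string _ _
  unfold Spec_countGoodSubstring
  exact pvFinal n string
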